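-- pv_equiv track=rewrite | github.com/MrBrantCode/unitest_baseline | mut_generate/mist_train_cf/cf_53081/solution.py | solve_string_problem
-- ===== SOURCE A (Python) =====
-- def solve_string_problem(string1, string2):
--
--     def count_characters(string):
--         count_dict = {}
--         for char in string:
--             if char not in count_dict:
--                 count_dict[char] = 1
--             else:
--                 count_dict[char] += 1
--         return count_dict
--
--     def sort_dictionary(dictionary):
--         sorted_dict = {}
--         sorted_keys = list(dictionary.keys())
--         sorted_keys.sort()
--         for key in sorted_keys:
--             sorted_dict[key] = dictionary[key]
--         return sorted_dict
--
--     string1_counts = count_characters(string1)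
--     string2_counts = count_characters(string2)
--
--     string1_sorted = sort_dictionary(string1_counts)
--     string2_sorted = sort_dictionary(string2_counts)
--
--     if len(string1) > len(string2):
--         return string1, string1_sorted
--     else:
--         return string2, string2_sorted
-- ===== SOURCE B (Python) =====
-- def solve_string_problem(string1, string2):
--     # pick the winner first, then count only its characters by a single
--     # grouped pass over its sorted characters (runs of equal chars)
--     winner = string1 if len(string1) > len(string2) else string2
--     chars = sorted(winner)
--     counts = {}
--     while chars:
--         c = chars[0]
--         run = 1
--         while run < len(chars) and chars[run] == c:
--             run += 1
--         counts[c] = run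
--         chars = chars[run:]
--     return winner, counts
-- ===== Notes on version B (the rewrite author's own statement) =====
-- stated objective: alternative
-- what changed: B picks the longer string first and builds its sorted count dict in one grouped pass over the sorted characters (run-length grouping), instead of counting both strings into unordered dicts and then rebuilding each by sorted keys.
import Mathlib
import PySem

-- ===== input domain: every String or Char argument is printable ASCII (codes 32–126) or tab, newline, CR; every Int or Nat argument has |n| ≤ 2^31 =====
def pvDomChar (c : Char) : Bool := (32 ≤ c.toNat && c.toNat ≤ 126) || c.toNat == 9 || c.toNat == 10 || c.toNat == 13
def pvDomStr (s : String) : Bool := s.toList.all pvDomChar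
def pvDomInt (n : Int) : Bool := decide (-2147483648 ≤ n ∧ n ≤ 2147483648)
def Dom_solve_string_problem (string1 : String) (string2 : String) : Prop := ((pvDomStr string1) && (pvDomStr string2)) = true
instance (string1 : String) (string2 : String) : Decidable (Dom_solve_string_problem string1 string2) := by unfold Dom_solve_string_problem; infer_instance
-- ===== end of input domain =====

-- B picks the longer string first and builds its sorted count dict in one grouped pass
-- over the string's sorted characters, instead of counting both strings into unordered
-- dicts and rebuilding each by sorted keys (objective: alternative algorithm).

-- ===== PORT A =====
-- Python dict keys are the 1-char strings yielded by iterating the string; ported with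
-- Char keys (comparison of 1-char strings = Char comparison, so sorting is exact) and
-- converted to 1-char Strings at the output boundary.
def pvCountCharacters (s : String) : PySem.Dict Char Int :=
  s.toList.foldl
    (fun d c => if d.contains c = false then d.insert c 1 else d.modify c 0 (· + 1))
    PySem.Dict.empty

def pvSortDictionary (d : PySem.Dict Char Int) : PySem.Dict Char Int :=
  let sortedKeys := PySem.List.sorted d.keys (fun k => k) false
  -- dictionary[key]: key always present (keys come from d), so getD is exact here
  sortedKeys.foldl (fun sd k => sd.insert k (d.getD k 0)) PySem.Dict.empty

def solve_string_problem (string1 : String) (string2 : String) : String × (List (String × Int)) :=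
  let string1_sorted := pvSortDictionary (pvCountCharacters string1)
  let string2_sorted := pvSortDictionary (pvCountCharacters string2)
  if PySem.Str.len string1 > PySem.Str.len string2 then
    (string1, string1_sorted.items.map (fun p => (String.ofList [p.1], p.2)))
  else
    (string2, string2_sorted.items.map (fun p => (String.ofList [p.1], p.2)))

-- ===== PORT B =====
-- the while loop of Source B: run = 1 + length of the run of chars equal to chars[0]
-- (the inner while scans exactly that run, so chars[run:] = dropWhile (== c))
def pvRunsDict : List Char → PySem.Dict Char Int → PySem.Dict Char Int
  | [], counts => counts
  | c :: rest, counts =>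
      let run : Nat := 1 + (rest.takeWhile (fun x => x == c)).length
      pvRunsDict (rest.dropWhile (fun x => x == c)) (counts.insert c (run : Int))
termination_by chars _ => chars.length
decreasing_by
  simpa using Nat.lt_succ_of_le (List.length_dropWhile_le _ _)

def solve_string_problem_alt (string1 : String) (string2 : String) : String × (List (String × Int)) :=
  let winner := if PySem.Str.len string1 > PySem.Str.len string2 then string1 else string2
  let chars := PySem.List.sorted winner.toList (fun c => c) false
  let counts := pvRunsDict chars PySem.Dict.empty
  (winner, counts.items.map (fun p => (String.ofList [p.1], p.2)))

-- ===== PRECONDITION & SPEC =====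
def Spec_solve_string_problem (string1 : String) (string2 : String) (out : String × (List (String × Int))) : Prop := out = solve_string_problem_alt string1 string2
instance (string1 : String) (string2 : String) (out : String × (List (String × Int))) : Decidable (Spec_solve_string_problem string1 string2 out) := by unfold Spec_solve_string_problem; infer_instance

-- ===== CLAIM (what is proved, stated in full; the proofs are below) =====
def Claim_equal_solve_string_problem : Prop := ∀ (string1 : String) (string2 : String), Dom_solve_string_problem string1 string2 → Spec_solve_string_problem string1 string2 (solve_string_problem string1 string2)

-- ===== LEMMAS AND PROOFS =====

-- A's branchy counting step is exactly the counter step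
lemma pvCount_step (d : PySem.Dict Char Int) (c : Char) :
    (if d.contains c = false then d.insert c 1 else d.modify c 0 (· + 1))
      = d.insert c (d.getD c 0 + 1) := by
  by_cases h : d.contains c = true
  · simp [h, PySem.Dict.modify, PySem.Dict.insert, PySem.Dict.getD]
  · have h' : d.contains c = false := by simpa using h
    simp [h', PySem.Dict.getD_of_not_contains d 0 h']

lemma pvCountCharacters_eq_counter (s : String) :
    pvCountCharacters s = PySem.Dict.counter s.toList := by
  unfold pvCountCharacters
  rw [show (fun (d : PySem.Dict Char Int) (c : Char) =>
        if d.contains c = false then d.insert c 1 else d.modify c 0 (· + 1))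
      = (fun d c => d.insert c (d.getD c 0 + 1)) from funext fun d => funext fun c => pvCount_step d c]
  exact PySem.Dict.foldl_insert_getD_add_one_eq_counter _

-- the canonical sorted count list of a character list
def pvCanon (l : List Char) : List (Char × Int) :=
  (PySem.List.sorted (PySem.Set.ofList l) (fun x => x) false).map
    (fun k => (k, (l.count k : Int)))

lemma pvSortDictionary_counter_items (l : List Char) :
    (pvSortDictionary (PySem.Dict.counter l)).items = pvCanon l := by
  have hnd : (PySem.List.sorted (PySem.Set.ofList l) (fun x => x) false).Nodup :=
    (PySem.List.sorted_perm _ _ _).nodup_iff.mpr (PySem.Set.nodup_ofList l)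
  show (List.foldl (fun sd k => sd.insert k ((PySem.Dict.counter l).getD k 0)) PySem.Dict.empty
      (PySem.List.sorted (PySem.Dict.counter l).keys (fun k => k) false)).items = _
  rw [PySem.Dict.keys_counter]
  rw [PySem.Dict.items_foldl_insert_fresh _ (fun x => x)
      (fun k => (PySem.Dict.counter l).getD k 0) _
      (fun a _ => PySem.Dict.contains_empty a) (by simpa using hnd)]
  unfold pvCanon
  have : PySem.Dict.empty.items = ([] : List (Char × Int)) := rfl
  simp [PySem.Dict.getD_counter, this]

-- every element after the dropped run is strictly greater than the run's character
lemma pvDrop_gt (c : Char) (rest : List Char) (hp : (c :: rest).Pairwise (· ≤ ·)) :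
    ∀ x ∈ rest.dropWhile (fun x => x == c), c < x := by
  intro x hx
  have hhsub : ∀ y ∈ rest, c ≤ y := fun y hy => (List.pairwise_cons.mp hp).1 y hy
  cases hR : rest.dropWhile (fun x => x == c) with
  | nil => rw [hR] at hx; cases hx
  | cons h t =>
    rw [hR] at hx
    have hmemh : h ∈ rest := (List.dropWhile_sublist _).subset (by rw [hR]; exact List.mem_cons_self ..)
    have hne : (h == c) = false := by
      have h0 := List.head?_dropWhile_not (fun x => x == c) rest
      rw [hR] at h0
      exact h0
    have hch : c < h := lt_of_le_of_ne (hhsub h hmemh) (fun e => by rw [e] at hne; simp at hne)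
    rcases List.mem_cons.mp hx with rfl | hx'
    · exact hch
    · have hRp : (h :: t).Pairwise (· ≤ ·) := by
        have hq : (rest.dropWhile (fun x => x == c)).Pairwise (· ≤ ·) :=
          List.Pairwise.sublist (List.dropWhile_sublist _) ((List.pairwise_cons.mp hp).2)
        rwa [hR] at hq
      exact lt_of_lt_of_le hch ((List.pairwise_cons.mp hRp).1 x hx')

lemma pvSorted_ofList_cons (c : Char) (t R : List Char)
    (ht : ∀ x ∈ t, x = c) (hR : ∀ x ∈ R, c < x) :
    PySem.List.sorted (PySem.Set.ofList (c :: (t ++ R))) (fun x => x) false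
      = c :: PySem.List.sorted (PySem.Set.ofList R) (fun x => x) false := by
  apply PySem.List.sorted_eq_of_perm_of_pairwise_lt
  · -- permutation: (c :: sorted(set R)) ~ set(c :: t ++ R)
    have hmemS : ∀ x, x ∈ PySem.List.sorted (PySem.Set.ofList R) (fun x => x) false ↔ x ∈ R := by
      intro x; rw [PySem.List.mem_sorted]; exact PySem.Set.mem_ofList ..
    have hnd1 : (c :: PySem.List.sorted (PySem.Set.ofList R) (fun x => x) false).Nodup := by
      refine List.nodup_cons.mpr ⟨?_, (PySem.List.sorted_perm _ _ _).nodup_iff.mpr (PySem.Set.nodup_ofList R)⟩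
      intro hc; exact absurd ((hmemS c).mp hc) (fun h => lt_irrefl c (hR c h))
    refine (List.perm_ext_iff_of_nodup hnd1 (PySem.Set.nodup_ofList _)).mpr ?_
    intro a
    rw [PySem.Set.mem_ofList]
    simp only [List.mem_cons, List.mem_append, hmemS]
    constructor
    · rintro (rfl | h) <;> simp_all
    · rintro (rfl | h | h)
      · exact Or.inl rfl
      · exact Or.inl (ht a h)
      · exact Or.inr h
  · -- strictly increasing
    refine List.pairwise_cons.mpr ⟨?_, ?_⟩
    · intro x hx
      rw [PySem.List.mem_sorted] at hx
      exact hR x ((PySem.Set.mem_ofList ..).mp hx)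
    · exact PySem.List.sorted_ofList_pairwise_lt R

lemma pvRunsDict_items (n : Nat) :
    ∀ (L : List Char) (d : PySem.Dict Char Int), L.length ≤ n →
    L.Pairwise (· ≤ ·) → (∀ c ∈ L, d.contains c = false) → d.keys.Nodup →
    (pvRunsDict L d).items = d.items ++ pvCanon L := by
  induction n with
  | zero =>
    intro L d hlen _ _ _
    have : L = [] := List.length_eq_zero_iff.mp (Nat.le_zero.mp hlen)
    subst this
    simp [pvRunsDict, pvCanon, PySem.Set.ofList, PySem.List.sorted]
  | succ n ih =>
    intro L d hlen hp hfresh hnd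
    cases L with
    | nil => simp [pvRunsDict, pvCanon, PySem.Set.ofList, PySem.List.sorted]
    | cons c rest =>
      set t := rest.takeWhile (fun x => x == c) with hT
      set R := rest.dropWhile (fun x => x == c) with hRdef
      have hsplit : rest = t ++ R := (List.takeWhile_append_dropWhile ..).symm
      have hts : ∀ x ∈ t, x = c := by
        intro x hx
        have := List.mem_takeWhile_imp (l := rest) (p := fun x => x == c) (hT ▸ hx)
        simpa using this
      have hRgt : ∀ x ∈ R, c < x := pvDrop_gt c rest hp
      have hRne : ∀ x ∈ R, x ≠ c := fun x hx h => absurd (hRgt x hx) (by simp [h])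
      have hcfresh : d.contains c = false := hfresh c (by simp)
      have hRlen : R.length ≤ n := by
        have : R.length ≤ rest.length := List.length_dropWhile_le _ _
        have hl : rest.length ≤ n := by simpa using Nat.lt_succ_iff.mp (by simpa using hlen)
        omega
      have hRsub : ∀ x ∈ R, x ∈ rest := fun x hx => (List.dropWhile_sublist _).subset hx
      have hmain : (pvRunsDict R (d.insert c ((1 + t.length : Nat) : Int))).items
          = (d.insert c ((1 + t.length : Nat) : Int)).items ++ pvCanon R := by
        refine ih R _ hRlen (List.Pairwise.sublist (List.dropWhile_sublist _) (List.pairwise_cons.mp hp).2) ?_ ?_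
        · intro x hx
          rw [PySem.Dict.contains_insert]
          simp [hRne x hx, hfresh x (by simp [hRsub x hx])]
        · exact PySem.Dict.nodup_keys_insert d c _ hnd
      have hstep : pvRunsDict (c :: rest) d
          = pvRunsDict R (d.insert c ((1 + t.length : Nat) : Int)) := by
        rw [pvRunsDict]
      rw [hstep, hmain, PySem.Dict.items_insert_of_not_contains d _ hcfresh, List.append_assoc]
      congr 1
      -- [(c, 1 + |t|)] ++ pvCanon R = pvCanon (c :: rest)
      unfold pvCanon
      have hkeysEq := pvSorted_ofList_cons c t R hts hRgt
      rw [hsplit, hkeysEq, List.map_cons]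
      have hcountc : ((c :: (t ++ R)).count c : Int) = ((1 + t.length : Nat) : Int) := by
        have : (c :: (t ++ R)).count c = t.length + 1 := by
          rw [List.count_cons_self, List.count_append]
          have h1 : t.count c = t.length := List.count_eq_length.mpr (fun b hb => (hts b hb).symm)
          have h2 : R.count c = 0 := List.count_eq_zero.mpr (fun h => (hRne c h) rfl)
          omega
        rw [this]; push_cast; ring
      have hcountR : ∀ k ∈ PySem.List.sorted (PySem.Set.ofList R) (fun x => x) false,
          (c :: (t ++ R)).count k = R.count k := by
        intro k hk
        rw [PySem.List.mem_sorted] at hk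
        have hkR : k ∈ R := (PySem.Set.mem_ofList ..).mp hk
        have hkc : k ≠ c := hRne k hkR
        have h1 : t.count k = 0 := List.count_eq_zero.mpr (fun h => hkc (hts k h))
        simp [Ne.symm hkc, List.count_append, h1]
      rw [hcountc, List.singleton_append]
      congr 1
      refine List.map_congr_left fun k hk => ?_
      rw [hcountR k hk]


-- the two per-string pipelines agree
lemma pvPipeline_eq (s : String) :
    (pvSortDictionary (pvCountCharacters s)).items
      = (pvRunsDict (PySem.List.sorted s.toList (fun c => c) false) PySem.Dict.empty).items := by
  rw [pvCountCharacters_eq_counter, pvSortDictionary_counter_items]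
  set L := PySem.List.sorted s.toList (fun c => c) false with hL
  have hperm : L.Perm s.toList := PySem.List.sorted_perm _ _ _
  have hrun : (pvRunsDict L PySem.Dict.empty).items = PySem.Dict.empty.items ++ pvCanon L := by
    refine pvRunsDict_items L.length L _ le_rfl ?_ (fun c _ => PySem.Dict.contains_empty c) ?_
    · simpa using PySem.List.sorted_pairwise s.toList (fun c => c)
    · simp [PySem.Dict.keys_empty]
  rw [hrun]
  have hempty : PySem.Dict.empty.items = ([] : List (Char × Int)) := rfl
  rw [hempty, List.nil_append]
  -- pvCanon s.toList = pvCanon L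
  unfold pvCanon
  have hsetperm : (PySem.Set.ofList s.toList).Perm (PySem.Set.ofList L) := by
    refine (List.perm_ext_iff_of_nodup (PySem.Set.nodup_ofList _) (PySem.Set.nodup_ofList _)).mpr ?_
    intro a
    rw [PySem.Set.mem_ofList, PySem.Set.mem_ofList]
    exact ⟨fun h => hperm.mem_iff.mpr h, fun h => hperm.mem_iff.mp h⟩
  rw [PySem.List.sorted_eq_sorted_of_perm _ _ _ (fun a b h => h) hsetperm]
  exact List.map_congr_left (fun k _ => by rw [hperm.count_eq])

-- ===== VERDICT (by name: the statement is the Claim_ definition above) =====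
theorem solve_string_problem_spec : Claim_equal_solve_string_problem := by
  intro string1 string2 _
  unfold Spec_solve_string_problem solve_string_problem solve_string_problem_alt
  by_cases h : PySem.Str.len string1 > PySem.Str.len string2 <;>
    simp only [h, if_pos] <;>
    simp [pvPipeline_eq]
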